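-- pv_equiv track=rewrite | github.com/unsolomon/algorithm_study | 프로그래머스/1/161989. 덧칠하기/덧칠하기.py | solution
-- ===== SOURCE A (Python) =====
-- def solution(n, m, section):
--     answer = 0
--
--     i = 0
--     length = len(section)
--
--     while i < length:
--         roll_end = section[i] + m -1
--         answer += 1
--
--
--         while i < length and section[i] <= roll_end:
--             i += 1
--
--
--     return answer
-- ===== SOURCE B (Python) =====
-- def solution(n, m, section):
--     answer = 0
--     remaining = section
--     while remaining:
--         cut = remaining[0] + m - 1
--         answer += 1
--         remaining = [s for s in remaining if s > cut]
--     return answer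
-- ===== Notes on version B (the rewrite author's own statement) =====
-- stated objective: alternative
-- what changed: Instead of advancing an index pointer past a covered prefix with nested while loops, B repeatedly rebuilds the remaining worklist by filtering out EVERY section already covered by the current roll and loops on the filtered remainder; this is correct because roll ends are strictly increasing, so a section once covered can never start a later roll.
import Mathlib
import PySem

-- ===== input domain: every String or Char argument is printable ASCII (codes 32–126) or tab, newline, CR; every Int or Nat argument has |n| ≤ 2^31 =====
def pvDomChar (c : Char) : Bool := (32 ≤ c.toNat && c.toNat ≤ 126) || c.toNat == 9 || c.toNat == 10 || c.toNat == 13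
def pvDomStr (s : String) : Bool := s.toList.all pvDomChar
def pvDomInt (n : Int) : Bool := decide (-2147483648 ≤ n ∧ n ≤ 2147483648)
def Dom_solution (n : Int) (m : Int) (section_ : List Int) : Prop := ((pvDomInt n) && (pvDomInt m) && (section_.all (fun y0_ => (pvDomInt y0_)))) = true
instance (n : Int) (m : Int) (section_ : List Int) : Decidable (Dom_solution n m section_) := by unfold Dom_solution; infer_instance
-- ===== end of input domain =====

-- B replaces A's index-pointer scan (nested whiles skipping a covered prefix) by a
-- worklist algorithm that each round filters out ALL sections covered by the current
-- roll (objective: alternative). Return-value equivalence only; neither mutates.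

-- ===== PORT A =====
-- inner while: advance i past every section[i] ≤ roll_end
def skipA (section_ : List Int) (roll_end : Int) (i : Nat) : Nat :=
  if h : i < section_.length ∧ section_.getD i 0 ≤ roll_end then
    skipA section_ roll_end (i + 1)
  else i
termination_by section_.length - i
decreasing_by omega

-- outer while, with fuel (one outer iteration consumes at least one section when m ≥ 1)
def outerA (section_ : List Int) (m : Int) (fuel : Nat) (i : Nat) (answer : Int) : Int :=
  match fuel with
  | 0 => answer
  | Nat.succ fuel' =>
    if i < section_.length then
      outerA section_ m fuel' (skipA section_ (section_.getD i 0 + m - 1) i) (answer + 1)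
    else answer

def solution (n : Int) (m : Int) (section_ : List Int) : Int :=
  outerA section_ m section_.length 0 0

-- ===== PORT B =====
-- Source B's while loop, with fuel (each round removes at least the head element when m ≥ 1)
def loopB (m : Int) (fuel : Nat) (remaining : List Int) (answer : Int) : Int :=
  match fuel, remaining with
  | _, [] => answer
  | 0, _ :: _ => answer
  | Nat.succ fuel', s :: rest =>
      loopB m fuel' ((s :: rest).filter (fun t => decide (s + m - 1 < t))) (answer + 1)

def solution_alt (n : Int) (m : Int) (section_ : List Int) : Int :=
  loopB m section_.length section_ 0

-- ===== PRECONDITION & SPEC =====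
-- Pre_ excludes m ≤ 0 with a nonempty section, on which A's inner while never advances i
-- and A loops forever (returns nothing); B's loop never empties its worklist there either.
def Pre_solution (n : Int) (m : Int) (section_ : List Int) : Prop := section_ = [] ∨ 1 ≤ m
instance (n : Int) (m : Int) (section_ : List Int) : Decidable (Pre_solution n m section_) := by unfold Pre_solution; infer_instance
def pvWitness_solution : Int × Int × List Int := (8, 2, ([1, 2, 5] : List Int))

def Spec_solution (n : Int) (m : Int) (section_ : List Int) (out : Int) : Prop := out = solution_alt n m section_
instance (n : Int) (m : Int) (section_ : List Int) (out : Int) : Decidable (Spec_solution n m section_ out) := by unfold Spec_solution; infer_instance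

-- ===== CLAIM (what is proved, stated in full; the proofs are below) =====
def Claim_equal_solution : Prop := ∀ (n : Int) (m : Int) (section_ : List Int), Dom_solution n m section_ → Pre_solution n m section_ → Spec_solution n m section_ (solution n m section_)

-- ===== LEMMAS AND PROOFS =====

-- list-level restatement of A's outer loop
def outerL (m : Int) : List Int → Int → Int
  | [], a => a
  | s :: rest, a => outerL m (rest.dropWhile (fun t => decide (t ≤ s + m - 1))) (a + 1)
termination_by l => l.length
decreasing_by exact Nat.lt_succ_of_le (List.length_dropWhile_le _ _)

theorem skipA_ge (section_ : List Int) (re : Int) (i : Nat) : i ≤ skipA section_ re i := by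
  unfold skipA
  split
  · exact le_trans (Nat.le_succ i) (skipA_ge section_ re (i + 1))
  · exact le_refl i
termination_by section_.length - i
decreasing_by omega

theorem skipA_drop (section_ : List Int) (re : Int) (i : Nat) :
    section_.drop (skipA section_ re i)
      = (section_.drop i).dropWhile (fun t => decide (t ≤ re)) := by
  unfold skipA
  split
  · rename_i h
    have hd : section_.drop i = section_.getD i 0 :: section_.drop (i + 1) := by
      rw [List.drop_eq_getElem_cons h.1]
      simp [List.getD, List.getElem?_eq_getElem h.1]
    rw [hd, List.dropWhile_cons, if_pos (by simpa using h.2)]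
    exact skipA_drop section_ re (i + 1)
  · rename_i h
    by_cases hi : i < section_.length
    · have h2 : ¬ section_.getD i 0 ≤ re := fun hle => h ⟨hi, hle⟩
      have hd : section_.drop i = section_.getD i 0 :: section_.drop (i + 1) := by
        rw [List.drop_eq_getElem_cons hi]
        simp [List.getD, List.getElem?_eq_getElem hi]
      rw [hd, List.dropWhile_cons, if_neg (by simpa using h2)]
    · rw [List.drop_eq_nil_of_le (by omega)]
      simp
termination_by section_.length - i
decreasing_by omega

theorem skipA_gt (section_ : List Int) (re : Int) (i : Nat)
    (hi : i < section_.length) (hle : section_.getD i 0 ≤ re) :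
    i + 1 ≤ skipA section_ re i := by
  rw [skipA, dif_pos ⟨hi, hle⟩]
  exact skipA_ge section_ re (i + 1)

theorem outerA_eq_outerL (section_ : List Int) (m : Int) (hm : 1 ≤ m) :
    ∀ (fuel i : Nat) (a : Int), (section_.drop i).length ≤ fuel →
      outerA section_ m fuel i a = outerL m (section_.drop i) a := by
  intro fuel
  induction fuel with
  | zero =>
    intro i a hlen
    have hnil : section_.drop i = [] := List.eq_nil_of_length_eq_zero (by omega)
    simp [outerA, hnil, outerL]
  | succ fuel' ih =>
    intro i a hlen
    by_cases hi : i < section_.length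
    · have hd : section_.drop i = section_.getD i 0 :: section_.drop (i + 1) := by
        rw [List.drop_eq_getElem_cons hi]
        simp [List.getD, List.getElem?_eq_getElem hi]
      have hle : section_.getD i 0 ≤ section_.getD i 0 + m - 1 := by omega
      have hskip : i + 1 ≤ skipA section_ (section_.getD i 0 + m - 1) i :=
        skipA_gt section_ _ i hi hle
      have hlen' : (section_.drop (skipA section_ (section_.getD i 0 + m - 1) i)).length ≤ fuel' := by
        rw [List.length_drop]
        rw [List.length_drop] at hlen
        omega
      rw [outerA, if_pos hi, ih _ _ hlen', skipA_drop, hd, List.dropWhile_cons,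
        if_pos (by simpa using hle)]
      rw [outerL]
    · have hnil : section_.drop i = [] := List.drop_eq_nil_of_le (by omega)
      rw [outerA, if_neg hi, hnil, outerL]

-- filtering with a larger threshold subsumes filtering with a smaller one
theorem filter_subsume (l : List Int) (c d : Int) (hcd : c ≤ d) :
    (l.filter (fun t => decide (c < t))).filter (fun t => decide (d < t))
      = l.filter (fun t => decide (d < t)) := by
  induction l with
  | nil => rfl
  | cons s r ih =>
    by_cases h1 : c < s <;> by_cases h2 : d < s <;>
      simp [List.filter_cons, h1, h2, ih] <;> omega

-- core invariant: greedy on the dropWhile suffix = greedy on the globally filtered list.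
-- Any element ≤ c stays below every later roll end, so dropping it globally is harmless.
theorem dropWhile_eq_filter_greedy (m : Int) (hm : 1 ≤ m) :
    ∀ (bnd : Nat) (l : List Int) (c : Int) (a : Int) (fuel : Nat),
      l.length ≤ bnd → (l.filter (fun t => decide (c < t))).length ≤ fuel →
      outerL m (l.dropWhile (fun t => decide (t ≤ c))) a
        = loopB m fuel (l.filter (fun t => decide (c < t))) a := by
  intro bnd
  induction bnd with
  | zero =>
    intro l c a fuel hl _
    have hnil : l = [] := List.eq_nil_of_length_eq_zero (by omega)
    subst hnil
    simp [outerL, loopB]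
  | succ bnd' ih =>
    intro l c a fuel hl hf
    cases l with
    | nil => simp [outerL, loopB]
    | cons s r =>
      by_cases hs : s ≤ c
      · have hnot : ¬ c < s := by omega
        rw [List.dropWhile_cons, if_pos (by simpa using hs)]
        rw [List.filter_cons_of_neg (by simpa using hnot)] at hf ⊢
        exact ih r c a fuel (by simpa using Nat.le_of_succ_le_succ hl) hf
      · have hcs : c < s := by omega
        rw [List.dropWhile_cons, if_neg (by simpa using hs), outerL]
        rw [List.filter_cons_of_pos (by simpa using hcs)] at hf ⊢
        cases fuel with
        | zero => simp at hf
        | succ fuel' =>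
          rw [loopB]
          have hfs : ¬ (s + m - 1 < s) := by omega
          rw [List.filter_cons_of_neg (by simpa using hfs),
            filter_subsume r c (s + m - 1) (by omega)]
          have hlen2 : (r.filter (fun t => decide (s + m - 1 < t))).length ≤ fuel' := by
            have h1 : (r.filter (fun t => decide (s + m - 1 < t))).length
                ≤ (r.filter (fun t => decide (c < t))).length := by
              rw [← filter_subsume r c (s + m - 1) (by omega)]
              exact List.length_filter_le _ _
            simp at hf
            omega
          exact ih r (s + m - 1) (a + 1) fuel' (by simpa using Nat.le_of_succ_le_succ hl) hlen2

-- ===== VERDICT (by name: the statement is the Claim_ definition above) =====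
theorem solution_spec : Claim_equal_solution := by
  intro n m section_ _ hpre
  unfold Spec_solution solution solution_alt
  rcases hpre with hnil | hm
  · subst hnil; simp [outerA, loopB]
  · rw [outerA_eq_outerL section_ m hm section_.length 0 0 (by simp)]
    simp only [List.drop_zero]
    cases section_ with
    | nil => simp [outerL, loopB]
    | cons s r =>
      rw [outerL]
      simp only [List.length_cons]
      rw [loopB]
      have hfs : ¬ (s + m - 1 < s) := by omega
      rw [List.filter_cons_of_neg (by simpa using hfs)]
      exact dropWhile_eq_filter_greedy m hm r.length r (s + m - 1) 1 r.length (le_refl _)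
        (by simpa using List.length_filter_le _ r)
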